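-- pv_equiv track=rewrite | github.com/MarcusKarlssonGH/aoc-2021 | day10.py | get_completion_score
-- ===== SOURCE A (Python) =====
-- OPEN = ["(", "[", "{", "<"]
--
-- CLOSE = [")", "]", "}", ">"]
--
-- MATCHING = {o: c for o, c in zip(OPEN, CLOSE)}
--
-- COMPLETION_SCORES = {c: v for c, v in zip(CLOSE, [1, 2, 3, 4])}
--
-- def get_completion_score(line):
--     unmatched = simplify(line)
--     s = 0
--     completion = [MATCHING[c] for c in unmatched[::-1]]
--     for c in completion:
--         s *= 5
--         s += COMPLETION_SCORES[c]
--     return s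
--
-- def simplify(line):
--     remaining = []
--     for c in line:
--         if c in OPEN:
--             remaining.append(c)
--         if c in CLOSE:
--             if c == MATCHING[remaining[-1]]:
--                 remaining.pop()
--             else:
--                 remaining.append(c)
--     return remaining
-- ===== SOURCE B (Python) =====
-- CLOSE_OF = {"(": ")", "[": "]", "{": "}", "<": ">"}
-- SCORE_OF = {"(": 1, "[": 2, "{": 3, "<": 4}
-- BRACKETS = "()[]{}<>"
--
-- def get_completion_score(line):
--     # phase 1: drop everything that is not a bracket
--     s = [c for c in line if c in BRACKETS]
--     # phase 2: rewrite to normal form by repeatedly deleting adjacent matched pairs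
--     while True:
--         out = []
--         i = 0
--         while i < len(s):
--             if i + 1 < len(s) and s[i] in CLOSE_OF and s[i + 1] == CLOSE_OF[s[i]]:
--                 i += 2  # delete the matched pair
--             else:
--                 out.append(s[i])
--                 i += 1
--         if len(out) == len(s):
--             break
--         s = out
--     # phase 3: a surviving closer means the line was corrupted
--     if any(c not in CLOSE_OF for c in s):
--         raise ValueError("corrupted line")
--     # phase 4: the survivors are the unmatched openers, bottom first; the top
--     # one is the most significant base-5 digit of the completion score
--     score, place = 0, 1
--     for c in s:
--         score += SCORE_OF[c] * place
--         place *= 5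
--     return score
-- ===== Notes on version B (the rewrite author's own statement) =====
-- stated objective: alternative
-- what changed: B abandons the stack matcher entirely: it filters the line to its brackets, rewrites that string to normal form by repeatedly deleting adjacent matched pairs until a fixpoint, and scores the surviving openers by a positional base-5 sum.
import Mathlib
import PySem

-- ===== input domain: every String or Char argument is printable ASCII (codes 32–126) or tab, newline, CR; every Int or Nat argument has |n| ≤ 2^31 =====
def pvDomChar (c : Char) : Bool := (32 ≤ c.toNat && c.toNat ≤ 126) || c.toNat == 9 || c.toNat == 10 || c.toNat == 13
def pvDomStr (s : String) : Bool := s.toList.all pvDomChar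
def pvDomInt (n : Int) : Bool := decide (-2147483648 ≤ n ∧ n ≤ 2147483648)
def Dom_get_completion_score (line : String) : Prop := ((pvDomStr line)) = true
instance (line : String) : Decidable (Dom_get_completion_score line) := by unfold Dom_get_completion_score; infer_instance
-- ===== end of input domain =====

-- B replaces A's stack matcher by staged rewriting: filter the line to its brackets, delete
-- adjacent matched pairs until a fixpoint, then score the surviving openers positionally.
-- Equivalence is claimed on uncorrupted lines (Pre_); on corrupted lines both Pythons raise.

-- ===== PORT A =====
def pvOPEN : List Char := ['(', '[', '{', '<']
def pvCLOSE : List Char := [')', ']', '}', '>']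
def pvMATCHING : PySem.Dict Char Char :=
  PySem.Dict.ofList [('(', ')'), ('[', ']'), ('{', '}'), ('<', '>')]
def pvCOMPLETION_SCORES : PySem.Dict Char Int :=
  PySem.Dict.ofList [(')', 1), (']', 2), ('}', 3), ('>', 4)]

-- simplify(line): stack loop; `none` exactly where Python raises (remaining[-1] IndexError,
-- MATCHING[remaining[-1]] KeyError)
def pvSimplifyA (st : List Char) : List Char → Option (List Char)
  | [] => some st
  | c :: cs =>
    let st1 := if pvOPEN.contains c then st ++ [c] else st
    if pvCLOSE.contains c then
      match PySem.List.pyGet? st1 (-1) with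
      | none => none
      | some t =>
        match pvMATCHING.get? t with
        | none => none
        | some mt => if c = mt then pvSimplifyA st1.dropLast cs else pvSimplifyA (st1 ++ [c]) cs
    else pvSimplifyA st1 cs

def get_completion_score (line : String) : Int :=
  match pvSimplifyA [] line.toList with
  | none => 0   -- Python raises in simplify; outside Pre_
  | some unmatched =>
    match (unmatched.reverse).mapM (fun c => pvMATCHING.get? c) with
    | none => 0 -- Python raises KeyError in the comprehension; outside Pre_
    | some completion =>
      completion.foldl (fun s c => s * 5 + pvCOMPLETION_SCORES.getD c 0) 0

-- ===== PORT B =====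
def pvCLOSE_OF : PySem.Dict Char Char :=
  PySem.Dict.ofList [('(', ')'), ('[', ']'), ('{', '}'), ('<', '>')]
def pvSCORE_OF : PySem.Dict Char Int :=
  PySem.Dict.ofList [('(', 1), ('[', 2), ('{', 3), ('<', 4)]
def pvIsBracket (c : Char) : Bool := "()[]{}<>".toList.contains c

-- one sweep of phase 2's inner while-loop: copy, deleting each adjacent matched pair met
def pvSweep : List Char → List Char
  | c1 :: c2 :: rest =>
    (match pvCLOSE_OF.get? c1 with
     | some v => if c2 = v then pvSweep rest else c1 :: pvSweep (c2 :: rest)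
     | none => c1 :: pvSweep (c2 :: rest))
  | l => l

-- phase 2's outer while-loop: sweep until a pass deletes nothing (lengths equal)
def pvNormalize (s : List Char) : List Char :=
  let t := pvSweep s
  if _h : t.length < s.length then pvNormalize t else s
termination_by s.length

def get_completion_score_alt (line : String) : Int :=
  let s := pvNormalize (line.toList.filter pvIsBracket)
  if s.any (fun c => ¬ pvCLOSE_OF.contains c) then 0  -- Source B raises ValueError; outside Pre_
  else (s.foldl (fun (sp : Int × Int) c => (sp.1 + pvSCORE_OF.getD c 0 * sp.2, sp.2 * 5)) (0, 1)).1

-- ===== PRECONDITION & SPEC =====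
-- Pre_: the line's brackets are uncorrupted (every closer matches the most recent unmatched
-- opener). Exactly there Python A returns; on corrupted lines A raises IndexError/KeyError
-- and B raises ValueError. Checker kept independent of both ports: stack of expected closers,
-- top first.
def pvCloseOf (c : Char) : Char :=
  if c = '(' then ')' else if c = '[' then ']' else if c = '{' then '}' else '>'

def pvChk (st : List Char) : List Char → Bool
  | [] => true
  | c :: cs =>
    if c ∈ ['(', '[', '{', '<'] then pvChk (pvCloseOf c :: st) cs
    else if c ∈ [')', ']', '}', '>'] then
      match st with
      | t :: st' => t = c && pvChk st' cs
      | [] => false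
    else pvChk st cs

def Pre_get_completion_score (line : String) : Prop := pvChk [] line.toList = true
instance (line : String) : Decidable (Pre_get_completion_score line) := by
  unfold Pre_get_completion_score; infer_instance

def pvWitness_get_completion_score : String := "<{(()[]"

def Spec_get_completion_score (line : String) (out : Int) : Prop := out = get_completion_score_alt line
instance (line : String) (out : Int) : Decidable (Spec_get_completion_score line out) := by unfold Spec_get_completion_score; infer_instance

-- ===== CLAIM (what is proved, stated in full; the proofs are below) =====
def Claim_equal_get_completion_score : Prop := ∀ (line : String), Dom_get_completion_score line → Pre_get_completion_score line → Spec_get_completion_score line (get_completion_score line)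

-- ===== LEMMAS AND PROOFS =====

lemma pv_open_iff (c : Char) : c ∈ pvOPEN ↔ (c = '(' ∨ c = '[' ∨ c = '{' ∨ c = '<') := by
  simp [pvOPEN]

lemma pv_bracket_iff (c : Char) : pvIsBracket c = true ↔ (c ∈ pvOPEN ∨ c ∈ pvCLOSE) := by
  have h : "()[]{}<>".toList = ['(',')','[',']','{','}','<','>'] := rfl
  simp [pvIsBracket, h, pvOPEN, pvCLOSE]
  tauto

lemma pv_matching_of_open {c : Char} (h : c ∈ pvOPEN) :
    pvMATCHING.get? c = some (pvCloseOf c) := by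
  rcases (pv_open_iff c).1 h with rfl | rfl | rfl | rfl <;> rfl

lemma pv_matching_of_not_open {c : Char} (h : c ∉ pvOPEN) : pvMATCHING.get? c = none := by
  simp [pvOPEN, not_or] at h
  obtain ⟨n1, n2, n3, n4⟩ := h
  simp [pvMATCHING, PySem.Dict.ofList, PySem.Dict.update, PySem.Dict.get?_insert,
    PySem.Dict.get?_empty, n1, n2, n3, n4]

lemma pv_matching_some {c v : Char} (h : pvMATCHING.get? c = some v) :
    c ∈ pvOPEN ∧ v = pvCloseOf c := by
  by_cases hc : c ∈ pvOPEN
  · refine ⟨hc, ?_⟩; rw [pv_matching_of_open hc] at h; exact (Option.some_inj.1 h).symm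
  · rw [pv_matching_of_not_open hc] at h; cases h

lemma pv_closeof_eq : pvCLOSE_OF = pvMATCHING := rfl

lemma pv_open_not_close {c : Char} (h : c ∈ pvOPEN) : c ∉ pvCLOSE := by
  rcases (pv_open_iff c).1 h with rfl | rfl | rfl | rfl <;> decide

lemma pv_closeof_close {c : Char} (h : c ∈ pvOPEN) : pvCloseOf c ∈ pvCLOSE := by
  rcases (pv_open_iff c).1 h with rfl | rfl | rfl | rfl <;> decide

-- step equations for A's stack loop
lemma pvStepOpen {c : Char} (h : c ∈ pvOPEN) (st cs : List Char) :
    pvSimplifyA st (c :: cs) = pvSimplifyA (st ++ [c]) cs := by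
  simp [pvSimplifyA, h, pv_open_not_close h]

lemma pvStepOther {c : Char} (h1 : c ∉ pvOPEN) (h2 : c ∉ pvCLOSE) (st cs : List Char) :
    pvSimplifyA st (c :: cs) = pvSimplifyA st cs := by
  simp [pvSimplifyA, h1, h2]

lemma pvStepCloseNil {c : Char} (h : c ∈ pvCLOSE) (cs : List Char) :
    pvSimplifyA [] (c :: cs) = none := by
  have hno : c ∉ pvOPEN := fun ho => pv_open_not_close ho h
  simp [pvSimplifyA, h, hno, PySem.List.pyGet?, PySem.List.pyIdx?]

lemma pvStepCloseMatch {c t : Char} (h : c ∈ pvCLOSE) (ht : t ∈ pvOPEN)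
    (hm : c = pvCloseOf t) (u cs : List Char) :
    pvSimplifyA (u ++ [t]) (c :: cs) = pvSimplifyA u cs := by
  have hno : c ∉ pvOPEN := fun ho => pv_open_not_close ho h
  simp [pvSimplifyA, h, hno, pv_matching_of_open ht, ← hm]

lemma pvStepCloseMismatch {c t : Char} (h : c ∈ pvCLOSE) (ht : t ∈ pvOPEN)
    (hm : c ≠ pvCloseOf t) (u cs : List Char) :
    pvSimplifyA (u ++ [t]) (c :: cs) = pvSimplifyA (u ++ [t] ++ [c]) cs := by
  have hno : c ∉ pvOPEN := fun ho => pv_open_not_close ho h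
  simp [pvSimplifyA, h, hno, pv_matching_of_open ht, hm]

lemma pvStepCloseBad {c t : Char} (h : c ∈ pvCLOSE) (ht : t ∉ pvOPEN) (u cs : List Char) :
    pvSimplifyA (u ++ [t]) (c :: cs) = none := by
  have hno : c ∉ pvOPEN := fun ho => pv_open_not_close ho h
  simp [pvSimplifyA, h, hno, pv_matching_of_not_open ht]

-- properties of the sweep
lemma pvSweepShort (l : List Char)
    (h : ∀ (c1 c2 : Char) (rest : List Char), l = c1 :: c2 :: rest → False) :
    pvSweep l = l := by
  match l with
  | [] => rfl
  | [a] => rfl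
  | a :: b :: r => exact (h a b r rfl).elim

lemma pvSweepLen (l : List Char) : (pvSweep l).length ≤ l.length := by
  induction l using pvSweep.induct with
  | case1 c1 rest v hv ih => simp [pvSweep, hv]; omega
  | case2 c1 c2 rest v hv hne ih =>
    have := ih; simp [pvSweep, hv, hne]; simp at this; omega
  | case3 c1 c2 rest hv ih =>
    have := ih; simp [pvSweep, hv]; simp at this; omega
  | case4 l h => simp [pvSweepShort l h]

lemma pvSweepEqOrLt (l : List Char) : pvSweep l = l ∨ (pvSweep l).length < l.length := by
  induction l using pvSweep.induct with
  | case1 c1 rest v hv ih =>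
    right; have := pvSweepLen rest; simp [pvSweep, hv]; omega
  | case2 c1 c2 rest v hv hne ih =>
    rcases ih with h | h
    · left; simp [pvSweep, hv, hne, h]
    · right; have : (c1 :: pvSweep (c2 :: rest)).length < (c1 :: c2 :: rest).length := by
        simp; simpa using h
      simpa [pvSweep, hv, hne] using this
  | case3 c1 c2 rest hv ih =>
    rcases ih with h | h
    · left; simp [pvSweep, hv, h]
    · right; have : (c1 :: pvSweep (c2 :: rest)).length < (c1 :: c2 :: rest).length := by
        simp; simpa using h
      simpa [pvSweep, hv] using this
  | case4 l h => left; exact pvSweepShort l h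

lemma pvSweepSubset (l : List Char) : pvSweep l ⊆ l := by
  induction l using pvSweep.induct with
  | case1 c1 rest v hv ih =>
    intro x hx; simp only [pvSweep, hv] at hx
    simp at hx
    exact List.mem_cons_of_mem _ (List.mem_cons_of_mem _ (ih hx))
  | case2 c1 c2 rest v hv hne ih =>
    intro x hx; simp only [pvSweep, hv, if_neg hne] at hx
    rcases List.mem_cons.1 hx with rfl | hx
    · exact List.mem_cons_self ..
    · exact List.mem_cons_of_mem _ (ih hx)
  | case3 c1 c2 rest hv ih =>
    intro x hx; simp only [pvSweep, hv] at hx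
    rcases List.mem_cons.1 hx with rfl | hx
    · exact List.mem_cons_self ..
    · exact List.mem_cons_of_mem _ (ih hx)
  | case4 l h => rw [pvSweepShort l h]; exact fun x h => h

-- a sweep never changes what A's stack run computes
lemma pvSweepPreserve : ∀ (l : List Char) (st : List Char),
    pvSimplifyA st (pvSweep l) = pvSimplifyA st l := by
  intro l
  induction l using pvSweep.induct with
  | case1 c1 rest v hv ih =>
    intro st
    obtain ⟨ho, rfl⟩ := pv_matching_some (pv_closeof_eq ▸ hv)
    rw [show pvSweep (c1 :: pvCloseOf c1 :: rest)
        = pvSweep rest by simp [pvSweep, hv]]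
    rw [ih st, pvStepOpen ho, pvStepCloseMatch (pv_closeof_close ho) ho rfl]
  | case2 c1 c2 rest v hv hne ih =>
    intro st
    obtain ⟨ho, rfl⟩ := pv_matching_some (pv_closeof_eq ▸ hv)
    rw [show pvSweep (c1 :: c2 :: rest)
        = c1 :: pvSweep (c2 :: rest) by simp [pvSweep, hv, hne]]
    rw [pvStepOpen ho, pvStepOpen ho, ih]
  | case3 c1 c2 rest hv ih =>
    intro st
    have hno : c1 ∉ pvOPEN := fun ho => by
      rw [pv_closeof_eq, pv_matching_of_open ho] at hv; cases hv
    rw [show pvSweep (c1 :: c2 :: rest)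
        = c1 :: pvSweep (c2 :: rest) by simp [pvSweep, hv]]
    by_cases hc : c1 ∈ pvCLOSE
    · rcases List.eq_nil_or_concat st with rfl | ⟨u, t, rfl⟩
      · rw [pvStepCloseNil hc, pvStepCloseNil hc]
      · simp only [List.concat_eq_append]
        by_cases hto : t ∈ pvOPEN
        · by_cases hm : c1 = pvCloseOf t
          · rw [pvStepCloseMatch hc hto hm, pvStepCloseMatch hc hto hm, ih]
          · rw [pvStepCloseMismatch hc hto hm, pvStepCloseMismatch hc hto hm, ih]
        · rw [pvStepCloseBad hc hto, pvStepCloseBad hc hto]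
    · rw [pvStepOther hno hc, pvStepOther hno hc, ih]
  | case4 l h => intro st; rw [pvSweepShort l h]

lemma pvNormPreserve (s : List Char) (st : List Char) :
    pvSimplifyA st (pvNormalize s) = pvSimplifyA st s := by
  induction s using pvNormalize.induct with
  | case1 s t h ih =>
    rw [pvNormalize, dif_pos h, ih, pvSweepPreserve]
  | case2 s t h => rw [pvNormalize, dif_neg h]

lemma pvNormNF (s : List Char) : pvSweep (pvNormalize s) = pvNormalize s := by
  induction s using pvNormalize.induct with
  | case1 s t h ih => rw [pvNormalize, dif_pos h]; exact ih
  | case2 s t h =>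
    rw [pvNormalize, dif_neg h]
    rcases pvSweepEqOrLt s with he | hl
    · exact he
    · exact (h hl).elim

lemma pvNormSubset (s : List Char) : pvNormalize s ⊆ s := by
  induction s using pvNormalize.induct with
  | case1 s t h =>
    rename_i ih
    rw [pvNormalize, dif_pos h]
    exact ih.trans (pvSweepSubset s)
  | case2 s t => rename_i h; rw [pvNormalize, dif_neg h]; exact fun x hx => hx

-- filtering non-brackets never changes what A's stack run computes
lemma pvFilterPreserve : ∀ (cs : List Char) (st : List Char),
    pvSimplifyA st (cs.filter pvIsBracket) = pvSimplifyA st cs := by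
  intro cs
  induction cs with
  | nil => intro st; rfl
  | cons c cs ih =>
    intro st
    by_cases hb : pvIsBracket c = true
    · rw [List.filter_cons_of_pos hb]
      rcases (pv_bracket_iff c).1 hb with ho | hc
      · rw [pvStepOpen ho, pvStepOpen ho, ih]
      · rcases List.eq_nil_or_concat st with rfl | ⟨u, t, rfl⟩
        · rw [pvStepCloseNil hc, pvStepCloseNil hc]
        · simp only [List.concat_eq_append]
          by_cases hto : t ∈ pvOPEN
          · by_cases hm : c = pvCloseOf t
            · rw [pvStepCloseMatch hc hto hm, pvStepCloseMatch hc hto hm, ih]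
            · rw [pvStepCloseMismatch hc hto hm, pvStepCloseMismatch hc hto hm, ih]
          · rw [pvStepCloseBad hc hto, pvStepCloseBad hc hto]
    · have := (fun h => hb ((pv_bracket_iff c).2 h))
      rw [List.filter_cons_of_neg (by simpa using hb),
          pvStepOther (fun h => this (Or.inl h)) (fun h => this (Or.inr h)), ih]

-- tail/head structure of a normal form
lemma pvNFTail {c : Char} {cs : List Char} (h : pvSweep (c :: cs) = c :: cs) :
    pvSweep cs = cs := by
  match cs with
  | [] => rfl
  | c2 :: rest =>
    rcases hg : pvCLOSE_OF.get? c with _ | v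
    · simpa [pvSweep, hg] using h
    · by_cases he : c2 = v
      · exfalso
        have hlen := pvSweepLen rest
        have : pvSweep rest = c :: c2 :: rest := by simpa [pvSweep, hg, he] using h
        rw [this] at hlen; simp at hlen
      · simpa [pvSweep, hg, he] using h

lemma pvNFHead {c c2 : Char} {rest : List Char}
    (h : pvSweep (c :: c2 :: rest) = c :: c2 :: rest)
    {v : Char} (hv : pvMATCHING.get? c = some v) : c2 ≠ v := by
  intro he
  have hg : pvCLOSE_OF.get? c = some v := pv_closeof_eq ▸ hv
  have hlen := pvSweepLen rest
  have : pvSweep rest = c :: c2 :: rest := by simpa [pvSweep, hg, he] using h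
  rw [this] at hlen; simp at hlen

-- on a normal form of brackets, A's stack run (when it returns) only pushes
lemma pvNoPop : ∀ (nf : List Char), (∀ c ∈ nf, pvIsBracket c = true) →
    pvSweep nf = nf → ∀ (st res : List Char),
    (∀ t, st.getLast? = some t → ∀ v, pvMATCHING.get? t = some v → nf.head? ≠ some v) →
    pvSimplifyA st nf = some res → res = st ++ nf := by
  intro nf
  induction nf with
  | nil =>
    intro _ _ st res _ hrun
    simpa [pvSimplifyA] using (Option.some_inj.1 hrun.symm)
  | cons c cs ih =>
    intro hbr hnf st res hside hrun
    have hbrcs : ∀ x ∈ cs, pvIsBracket x = true := fun x hx => hbr x (List.mem_cons_of_mem _ hx)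
    have hnfcs : pvSweep cs = cs := pvNFTail hnf
    rcases (pv_bracket_iff c).1 (hbr c (List.mem_cons_self ..)) with ho | hc
    · -- opener: push
      rw [pvStepOpen ho] at hrun
      have hres := ih hbrcs hnfcs (st ++ [c]) res ?side hrun
      · rw [hres]; simp
      case side =>
        intro t ht v hv hhd
        simp at ht; subst ht
        rw [pv_matching_of_open ho] at hv
        obtain rfl := Option.some_inj.1 hv
        match cs, hhd with
        | c2 :: rest, hhd =>
          exact pvNFHead hnf (pv_matching_of_open ho) (by simpa using hhd)
    · -- closer: the side condition forces a push
      rcases List.eq_nil_or_concat st with rfl | ⟨u, t, rfl⟩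
      · rw [pvStepCloseNil hc] at hrun; cases hrun
      · simp only [List.concat_eq_append] at hside hrun ⊢
        by_cases hto : t ∈ pvOPEN
        · have hm : c ≠ pvCloseOf t := by
            intro he
            exact hside t (by simp) (pvCloseOf t) (pv_matching_of_open hto) (by simp [he])
          rw [pvStepCloseMismatch hc hto hm] at hrun
          have hres := ih hbrcs hnfcs (u ++ [t] ++ [c]) res ?side2 hrun
          · rw [hres]; simp
          case side2 =>
            intro t' ht' v hv _
            simp at ht'; subst ht'
            have : c ∉ pvOPEN := fun h => pv_open_not_close h hc
            rw [pv_matching_of_not_open this] at hv; cases hv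
        · rw [pvStepCloseBad hc hto] at hrun; cases hrun

-- A-side: on an uncorrupted suffix, A's stack run succeeds with an all-open stack
lemma pvMainA : ∀ (cs stA : List Char), (∀ c ∈ stA, c ∈ pvOPEN) →
    pvChk ((stA.map pvCloseOf).reverse) cs = true →
    ∃ st', pvSimplifyA stA cs = some st' ∧ (∀ c ∈ st', c ∈ pvOPEN) := by
  intro cs
  induction cs with
  | nil =>
    intro stA hA _
    exact ⟨stA, rfl, hA⟩
  | cons c cs ih =>
    intro stA hA hchk
    by_cases hop : c ∈ pvOPEN
    · have hA' : ∀ x ∈ stA ++ [c], x ∈ pvOPEN := by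
        intro x hx; rcases List.mem_append.1 hx with h | h
        · exact hA x h
        · simp at h; subst h; exact hop
      have hmemO : c ∈ ['(', '[', '{', '<'] := by simpa [pvOPEN] using hop
      have hchk' : pvChk (((stA ++ [c]).map pvCloseOf).reverse) cs = true := by
        simp only [pvChk, if_pos hmemO] at hchk
        simpa using hchk
      obtain ⟨st', h1, h2⟩ := ih (stA ++ [c]) hA' hchk'
      exact ⟨st', by rwa [pvStepOpen hop], h2⟩
    · by_cases hcl : c ∈ pvCLOSE
      · have hmemO : c ∉ ['(', '[', '{', '<'] := fun h => hop h
        have hmemC : c ∈ [')', ']', '}', '>'] := hcl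
        rcases List.eq_nil_or_concat stA with rfl | ⟨l', a, rfl⟩
        · simp [pvChk, hmemO, hmemC] at hchk
        · simp only [List.concat_eq_append] at hA hchk ⊢
          have ha : a ∈ pvOPEN := hA a (by simp)
          have hrev : ((l' ++ [a]).map pvCloseOf).reverse
              = pvCloseOf a :: (l'.map pvCloseOf).reverse := by simp
          rw [hrev] at hchk
          simp only [pvChk, if_neg hmemO, if_pos hmemC] at hchk
          have hchk2 : (pvCloseOf a = c) ∧ pvChk ((l'.map pvCloseOf).reverse) cs = true := by
            simpa [Bool.and_eq_true, decide_eq_true_eq] using hchk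
          obtain ⟨hac, hchkrest⟩ := hchk2
          have hl' : ∀ x ∈ l', x ∈ pvOPEN := fun x hx => hA x (by simp [hx])
          obtain ⟨st', h1, h2⟩ := ih l' hl' hchkrest
          exact ⟨st', by rwa [pvStepCloseMatch hcl ha hac.symm], h2⟩
      · have hmemO : c ∉ ['(', '[', '{', '<'] := fun h => hop h
        have hmemC : c ∉ [')', ']', '}', '>'] := fun h => hcl h
        have hchk' : pvChk ((stA.map pvCloseOf).reverse) cs = true := by
          simpa [pvChk, hmemO, hmemC] using hchk
        obtain ⟨st', h1, h2⟩ := ih stA hA hchk'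
        exact ⟨st', by rwa [pvStepOther hop hcl], h2⟩

-- scoring: recursive positional value of the unmatched-opener stack, head = lowest power
def pvValO : List Char → Int
  | [] => 0
  | c :: t => pvSCORE_OF.getD c 0 + 5 * pvValO t

-- and the same value read off the translated closers (A's view)
def pvValC : List Char → Int
  | [] => 0
  | c :: t => pvCOMPLETION_SCORES.getD c 0 + 5 * pvValC t

lemma pvHorner (l : List Char) :
    l.reverse.foldl (fun s c => s * 5 + pvCOMPLETION_SCORES.getD c 0) 0 = pvValC l := by
  induction l with
  | nil => rfl
  | cons c t ih =>
    simp [List.reverse_cons, List.foldl_append, ih, pvValC]; ring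

lemma pvPairFold (l : List Char) : ∀ (s p : Int),
    (l.foldl (fun (sp : Int × Int) c => (sp.1 + pvSCORE_OF.getD c 0 * sp.2, sp.2 * 5)) (s, p)).1
      = s + p * pvValO l := by
  induction l with
  | nil => intro s p; simp [pvValO]
  | cons c t ih => intro s p; simp [List.foldl_cons, ih, pvValO]; ring

lemma pvValCO (l : List Char) (h : ∀ c ∈ l, c ∈ pvOPEN) :
    pvValC (l.map pvCloseOf) = pvValO l := by
  induction l with
  | nil => rfl
  | cons c t ih =>
    have hc := h c (List.mem_cons_self ..)
    have := ih (fun x hx => h x (List.mem_cons_of_mem _ hx))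
    have hhd : pvCOMPLETION_SCORES.getD (pvCloseOf c) 0 = pvSCORE_OF.getD c 0 := by
      rcases (pv_open_iff c).1 hc with rfl | rfl | rfl | rfl <;> rfl
    simp [pvValC, pvValO, hhd, this]

lemma pvMapM (l : List Char) (h : ∀ c ∈ l, c ∈ pvOPEN) :
    l.mapM (fun c => pvMATCHING.get? c) = some (l.map pvCloseOf) := by
  induction l with
  | nil => rfl
  | cons c t ih =>
    have hc := h c (List.mem_cons_self ..)
    have ht := ih (fun x hx => h x (List.mem_cons_of_mem _ hx))
    simp [List.mapM_cons, pv_matching_of_open hc, ht]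

-- ===== VERDICT (by name: the statement is the Claim_ definition above) =====
theorem get_completion_score_spec : Claim_equal_get_completion_score := by
  intro line _ hpre
  unfold Spec_get_completion_score
  obtain ⟨st', hA, hopens⟩ :=
    pvMainA line.toList [] (by intro c h; cases h) (by simpa using hpre)
  -- A's value
  have hmapM := pvMapM st'.reverse (fun c hc => hopens c (List.mem_reverse.1 hc))
  have hAval : get_completion_score line = pvValO st' := by
    simp only [get_completion_score, hA, hmapM]
    rw [← pvValCO st' hopens, ← pvHorner]
    simp [List.map_reverse]
  -- B's normal form equals A's stack
  have hnf : pvNormalize (line.toList.filter pvIsBracket) = st' := by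
    have hrun : pvSimplifyA [] (pvNormalize (line.toList.filter pvIsBracket)) = some st' := by
      rw [pvNormPreserve, pvFilterPreserve]; exact hA
    have hbr : ∀ c ∈ pvNormalize (line.toList.filter pvIsBracket), pvIsBracket c = true := by
      intro c hc
      exact List.of_mem_filter (pvNormSubset _ hc)
    have := pvNoPop _ hbr (pvNormNF _) [] st' (by intro t ht; simp at ht) hrun
    simpa using this.symm
  have hopenB : (st'.any fun c => decide (¬ pvCLOSE_OF.contains c = true)) = false := by
    simp only [List.any_eq_false]
    intro c hc
    rcases (pv_open_iff c).1 (hopens c hc) with rfl | rfl | rfl | rfl <;> decide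
  have hBval : get_completion_score_alt line = pvValO st' := by
    simp only [get_completion_score_alt, hnf, hopenB]
    simp only [Bool.false_eq_true, if_false, pvPairFold]
    ring
  rw [hAval, hBval]
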